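-- pv_equiv track=rewrite | github.com/RoiGerber/Navy-scheduler | Project Files/expiriments.py | IsEqual
-- ===== SOURCE A (Python) =====
-- def IsEqual(a,b):
--     HowMany = 0
--     for i in a:
--         for ii in b:
--             if i == ii:
--                 HowMany = HowMany + 1
--     if HowMany == 4:
--         return True
--     else:
--         return False
-- ===== SOURCE B (Python) =====
-- def IsEqual(a, b):
--     ca = {}
--     for x in a:
--         ca[x] = ca.get(x, 0) + 1
--     cb = {}
--     for x in b:
--         cb[x] = cb.get(x, 0) + 1
--     total = sum(c * cb.get(v, 0) for v, c in ca.items())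
--     return total == 4
-- ===== Notes on version B (the rewrite author's own statement) =====
-- stated objective: faster
-- what changed: Replaces the nested all-pairs scan with two frequency dictionaries built in one pass each, summing count products over distinct values of a.
import Mathlib
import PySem

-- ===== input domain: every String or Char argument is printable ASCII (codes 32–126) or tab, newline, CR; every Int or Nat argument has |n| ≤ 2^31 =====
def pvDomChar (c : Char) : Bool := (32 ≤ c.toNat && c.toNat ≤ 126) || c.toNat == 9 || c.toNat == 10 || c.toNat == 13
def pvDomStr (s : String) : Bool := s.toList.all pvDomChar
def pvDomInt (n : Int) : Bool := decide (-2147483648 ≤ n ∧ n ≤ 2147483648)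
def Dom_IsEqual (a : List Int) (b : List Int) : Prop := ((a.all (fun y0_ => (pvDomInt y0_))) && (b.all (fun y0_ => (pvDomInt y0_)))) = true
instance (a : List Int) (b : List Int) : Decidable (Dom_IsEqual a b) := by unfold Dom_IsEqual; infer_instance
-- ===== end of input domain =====

-- B replaces A's nested all-pairs scan by two frequency tables and a sum of count products (objective: faster).

-- ===== PORT A =====
def IsEqual (a : List Int) (b : List Int) : Bool :=
  let HowMany : Int :=
    a.foldl (fun h i => b.foldl (fun h' ii => if i == ii then h' + 1 else h') h) 0
  if HowMany == 4 then true else false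

-- ===== PORT B =====
def IsEqual_alt (a : List Int) (b : List Int) : Bool :=
  let ca : PySem.Dict Int Int := a.foldl (fun d x => d.insert x (d.getD x 0 + 1)) PySem.Dict.empty
  let cb : PySem.Dict Int Int := b.foldl (fun d x => d.insert x (d.getD x 0 + 1)) PySem.Dict.empty
  let total : Int := ca.items.foldl (fun s p => s + p.2 * cb.getD p.1 0) 0
  total == 4

-- ===== PRECONDITION & SPEC =====
def Spec_IsEqual (a : List Int) (b : List Int) (out : Bool) : Prop := out = IsEqual_alt a b
instance (a : List Int) (b : List Int) (out : Bool) : Decidable (Spec_IsEqual a b out) := by unfold Spec_IsEqual; infer_instance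

-- ===== CLAIM (what is proved, stated in full; the proofs are below) =====
def Claim_equal_IsEqual : Prop := ∀ (a : List Int) (b : List Int), Dom_IsEqual a b → Spec_IsEqual a b (IsEqual a b)

-- ===== LEMMAS AND PROOFS =====

-- A's inner loop over b counts occurrences of i in b
lemma inner_loop_count (b : List Int) (i : Int) (h : Int) :
    b.foldl (fun h' ii => if i == ii then h' + 1 else h') h = h + (b.count i : Int) := by
  induction b generalizing h with
  | nil => simp
  | cons x xs ih =>
    simp only [List.foldl_cons, List.count_cons, ih]
    by_cases hx : i = x <;> simp [hx] <;> omega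

-- A's HowMany as a sum over a
lemma howmany_eq_sum (a b : List Int) :
    a.foldl (fun h i => b.foldl (fun h' ii => if i == ii then h' + 1 else h') h) 0
      = (a.map (fun i => (b.count i : Int))).sum := by
  have key : ∀ (h0 : Int),
      a.foldl (fun h i => b.foldl (fun h' ii => if i == ii then h' + 1 else h') h) h0
        = a.foldl (fun h i => h + (b.count i : Int)) h0 := by
    induction a with
    | nil => intro h0; rfl
    | cons x xs _ => intro h0; simp only [List.foldl_cons, inner_loop_count]
  rw [key 0, PySem.List.foldl_add]
  simp

-- the multiset identity: summing f over a = summing (count · * f ·) over a's distinct values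
lemma sum_over_dedup (a : List Int) (f : Int → Int) :
    (a.map f).sum = ((PySem.Set.ofList a).map (fun k => (a.count k : Int) * f k)).sum := by
  have h1 : (a.map f).sum = ∑ x ∈ a.toFinset, (a.count x) • f x := by
    simpa using (Finset.sum_multiset_map_count (a : Multiset Int) f)
  have h2 : ((PySem.Set.ofList a).map (fun k => (a.count k : Int) * f k)).sum
      = ∑ x ∈ (PySem.Set.ofList a).toFinset, (a.count x : Int) * f x :=
    (List.sum_toFinset _ (PySem.Set.nodup_ofList a)).symm
  have h3 : (PySem.Set.ofList a).toFinset = a.toFinset := by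
    ext x; simp [PySem.Set.mem_ofList]
  rw [h1, h2, h3]
  refine Finset.sum_congr rfl (fun x _ => ?_)
  simp

-- ===== VERDICT (by name: the statement is the Claim_ definition above) =====
theorem IsEqual_spec : Claim_equal_IsEqual := by
  intro a b _
  unfold Spec_IsEqual IsEqual IsEqual_alt
  simp only [PySem.Dict.foldl_insert_getD_add_one_eq_counter]
  have htotal : ((PySem.Dict.counter a).items).foldl
      (fun s p => s + p.2 * (PySem.Dict.counter b).getD p.1 0) 0
      = ((PySem.Set.ofList a).map (fun k => (a.count k : Int) * (b.count k : Int))).sum := by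
    rw [PySem.Dict.items_counter, List.foldl_map, PySem.List.foldl_add]
    simp [PySem.Dict.getD_counter]
  rw [howmany_eq_sum, sum_over_dedup a (fun k => (b.count k : Int)), htotal]
  split <;> simp_all
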